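-- pv_equiv track=rewrite | github.com/dodomicc/compiler | 刚体物理/油管视频/GPU並行排序/Part3/bitonic.py | compare_and_swap
-- ===== SOURCE A (Python) =====
-- def compare_and_swap(arr, indices, stride):
--
--         new_indices = indices.copy()
--         for i in range(0, len(indices), stride * 2):
--             for j in range(stride):
--                 a = new_indices[i + j]
--                 b = new_indices[i + j + stride]
--                 if arr[a] > arr[b]:
--                     new_indices[i + j], new_indices[i + j + stride] = b, a
--         return new_indices
-- ===== SOURCE B (Python) =====
-- def compare_and_swap(arr, indices, stride):
--     # One pass: each output slot is computed independently from its partner slot,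
--     # without mutating (or copying then mutating) the index list.
--     block = 2 * stride
--
--     def winner(k):
--         if stride > 0:
--             if k % block < stride:                   # low slot, partner is k + stride
--                 a, b = indices[k], indices[k + stride]
--                 return a if arr[a] <= arr[b] else b
--             a, b = indices[k - stride], indices[k]   # high slot, partner is k - stride
--             return b if arr[a] <= arr[b] else a
--         return indices[k]                            # no pairs to compare: slot keeps its index
--
--     return [winner(k) for k in range(len(indices))]
-- ===== Notes on version B (the rewrite author's own statement) =====
-- stated objective: alternative
-- what changed: Replaces the nested block/offset loops with in-place swaps on a copy by a single pass that computes every output slot independently from its partner (k+stride or k-stride), chosen by the slot's position modulo the block size, building a fresh list.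
import Mathlib
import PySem

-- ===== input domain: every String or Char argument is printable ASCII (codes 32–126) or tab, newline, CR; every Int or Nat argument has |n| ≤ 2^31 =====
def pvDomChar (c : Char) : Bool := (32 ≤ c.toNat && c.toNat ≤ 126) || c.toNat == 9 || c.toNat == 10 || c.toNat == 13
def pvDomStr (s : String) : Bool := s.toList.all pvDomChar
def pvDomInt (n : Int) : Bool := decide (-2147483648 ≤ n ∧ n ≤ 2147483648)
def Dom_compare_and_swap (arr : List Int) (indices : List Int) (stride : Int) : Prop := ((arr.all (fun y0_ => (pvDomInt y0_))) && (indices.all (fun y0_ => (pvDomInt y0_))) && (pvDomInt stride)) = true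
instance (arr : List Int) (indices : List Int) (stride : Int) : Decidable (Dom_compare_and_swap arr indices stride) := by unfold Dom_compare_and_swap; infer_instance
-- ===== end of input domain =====

-- B computes every output slot independently from its partner slot (one pass over positions,
-- no mutation), instead of A's nested block/offset loops swapping in place on a copy.

-- ===== PORT A =====
-- inner loop body: `a = new[i+j]; b = new[i+j+stride]; if arr[a] > arr[b]: new[i+j], new[i+j+stride] = b, a`
def csInner (arr : List Int) (stride i : Int) (cur : List Int) (j : Int) : List Int :=
  let a := PySem.List.pyGetD cur (i + j) 0
  let b := PySem.List.pyGetD cur (i + j + stride) 0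
  if PySem.List.pyGetD arr a 0 > PySem.List.pyGetD arr b 0 then
    PySem.List.pySetD (PySem.List.pySetD cur (i + j) b) (i + j + stride) a
  else cur

def compare_and_swap (arr : List Int) (indices : List Int) (stride : Int) : List Int :=
  (PySem.List.pyRange 0 (PySem.List.len indices) (stride * 2)).foldl
    (fun cur i => (PySem.List.pyRange 0 stride 1).foldl (csInner arr stride i) cur)
    indices

-- ===== PORT B =====
-- `winner(k)`: the index this slot keeps, decided against its partner slot
def csWinner (arr : List Int) (indices : List Int) (stride : Int) (k : Int) : Int :=
  if 0 < stride then
    if PySem.Int.mod k (2 * stride) < stride then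
      let a := PySem.List.pyGetD indices k 0
      let b := PySem.List.pyGetD indices (k + stride) 0
      if PySem.List.pyGetD arr a 0 ≤ PySem.List.pyGetD arr b 0 then a else b
    else
      let a := PySem.List.pyGetD indices (k - stride) 0
      let b := PySem.List.pyGetD indices k 0
      if PySem.List.pyGetD arr a 0 ≤ PySem.List.pyGetD arr b 0 then b else a
  else PySem.List.pyGetD indices k 0

def compare_and_swap_alt (arr : List Int) (indices : List Int) (stride : Int) : List Int :=
  (List.range indices.length).map (fun k : Nat => csWinner arr indices stride (k : Int))

-- ===== PRECONDITION & SPEC =====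
-- Pre_ = exactly the inputs on which the Python A returns normally: a negative stride (the
-- outer range is empty, A returns an untouched copy), or a positive stride with a length that
-- is a whole number of blocks (otherwise A's new_indices[i+j+stride] access raises IndexError)
-- and every index valid for arr (otherwise arr[a] raises IndexError); stride = 0 raises
-- ValueError in range().
def Pre_compare_and_swap (arr : List Int) (indices : List Int) (stride : Int) : Prop :=
  stride < 0 ∨
  (1 ≤ stride ∧
   (indices.length : Int) % (2 * stride) = 0 ∧
   (∀ x ∈ indices, -(arr.length : Int) ≤ x ∧ x < (arr.length : Int)))
instance (arr : List Int) (indices : List Int) (stride : Int) : Decidable (Pre_compare_and_swap arr indices stride) := by unfold Pre_compare_and_swap; infer_instance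

def pvWitness_compare_and_swap : List Int × List Int × Int := ([3, 1, 2, 0], [0, 1, 2, 3], 1)

def Spec_compare_and_swap (arr : List Int) (indices : List Int) (stride : Int) (out : List Int) : Prop := out = compare_and_swap_alt arr indices stride
instance (arr : List Int) (indices : List Int) (stride : Int) (out : List Int) : Decidable (Spec_compare_and_swap arr indices stride out) := by unfold Spec_compare_and_swap; infer_instance

-- ===== CLAIM (what is proved, stated in full; the proofs are below) =====
def Claim_equal_compare_and_swap : Prop := ∀ (arr : List Int) (indices : List Int) (stride : Int), Dom_compare_and_swap arr indices stride → Pre_compare_and_swap arr indices stride → Spec_compare_and_swap arr indices stride (compare_and_swap arr indices stride)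

-- ===== LEMMAS AND PROOFS =====

theorem cs_mod_lemma (sN bt j : Nat) (hs : 0 < sN) (hbt : bt % (2*sN) = 0) (hj : j < 2*sN) :
    PySem.Int.mod ((bt + j : Nat) : Int) (2 * (sN : Int)) = (j : Int) := by
  rw [PySem.Int.mod_eq_emod_of_pos (by positivity)]
  have h2 : (2 * (sN : Int)) = ((2*sN : Nat) : Int) := by push_cast; ring
  rw [h2, ← Int.natCast_mod]
  have : (bt + j) % (2*sN) = j := by
    rw [Nat.add_mod, hbt]
    simp [Nat.mod_eq_of_lt hj]
  rw [this]

theorem csWinner_low (arr indices : List Int) (sN bt j : Nat) (hs : 0 < sN)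
    (hbt : bt % (2*sN) = 0) (hj : j < sN) :
    csWinner arr indices (sN : Int) ((bt + j : Nat) : Int) =
      (if PySem.List.pyGetD arr (PySem.List.pyGetD indices ((bt + j : Nat) : Int) 0) 0 ≤
          PySem.List.pyGetD arr (PySem.List.pyGetD indices ((bt + j + sN : Nat) : Int) 0) 0
       then PySem.List.pyGetD indices ((bt + j : Nat) : Int) 0
       else PySem.List.pyGetD indices ((bt + j + sN : Nat) : Int) 0) := by
  have hmod := cs_mod_lemma sN bt j hs hbt (by omega)
  have he : ((bt + j : Nat) : Int) + (sN : Int) = ((bt + j + sN : Nat) : Int) := by push_cast; ring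
  simp only [csWinner, hmod, he]
  rw [if_pos (by exact_mod_cast hs : (0:Int) < (sN:Int)), if_pos (by exact_mod_cast hj)]

theorem csWinner_high (arr indices : List Int) (sN bt j : Nat) (hs : 0 < sN)
    (hbt : bt % (2*sN) = 0) (hj : j < sN) :
    csWinner arr indices (sN : Int) ((bt + sN + j : Nat) : Int) =
      (if PySem.List.pyGetD arr (PySem.List.pyGetD indices ((bt + j : Nat) : Int) 0) 0 ≤
          PySem.List.pyGetD arr (PySem.List.pyGetD indices ((bt + sN + j : Nat) : Int) 0) 0
       then PySem.List.pyGetD indices ((bt + sN + j : Nat) : Int) 0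
       else PySem.List.pyGetD indices ((bt + j : Nat) : Int) 0) := by
  have hmod : PySem.Int.mod ((bt + sN + j : Nat) : Int) (2 * (sN : Int)) = ((sN + j : Nat) : Int) := by
    have : (bt + sN + j) = bt + (sN + j) := by omega
    rw [this]
    exact cs_mod_lemma sN bt (sN + j) hs hbt (by omega)
  have he : ((bt + sN + j : Nat) : Int) - (sN : Int) = ((bt + j : Nat) : Int) := by push_cast; ring
  simp only [csWinner, hmod, he]
  rw [if_pos (by exact_mod_cast hs : (0:Int) < (sN:Int)),
      if_neg (by exact_mod_cast (by omega : ¬ (sN + j < sN)))]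

theorem cs_inner_block (arr indices : List Int) (sN bt : Nat) (hs : 0 < sN)
    (hbt : bt % (2*sN) = 0) (hlen : bt + 2*sN ≤ indices.length) :
    ∀ (d j : Nat) (cur : List Int), j + d = sN →
      cur.length = indices.length →
      (∀ p : Nat, p < indices.length →
        PySem.List.pyGetD cur (p : Int) 0 =
          if p < bt + j ∨ (bt + sN ≤ p ∧ p < bt + sN + j) then
            csWinner arr indices (sN : Int) (p : Int)
          else PySem.List.pyGetD indices (p : Int) 0) →
      ((PySem.List.pyRange (j : Int) (sN : Int) 1).foldl
          (csInner arr (sN : Int) ((bt : Nat) : Int)) cur).length = indices.length ∧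
      (∀ p : Nat, p < indices.length →
        PySem.List.pyGetD ((PySem.List.pyRange (j : Int) (sN : Int) 1).foldl
            (csInner arr (sN : Int) ((bt : Nat) : Int)) cur) (p : Int) 0 =
          if p < bt + 2*sN then csWinner arr indices (sN : Int) (p : Int)
          else PySem.List.pyGetD indices (p : Int) 0) := by
  intro d
  induction d with
  | zero =>
    intro j cur hj hcl hinv
    rw [PySem.List.pyRange_one_eq_nil (by exact_mod_cast (by omega : sN ≤ j))]
    refine ⟨hcl, ?_⟩
    intro p hp
    rw [List.foldl_nil, hinv p hp]
    by_cases hc : p < bt + 2*sN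
    · rw [if_pos (by omega), if_pos hc]
    · rw [if_neg (by omega), if_neg hc]
  | succ d ih =>
    intro j cur hj hcl hinv
    have hjs : j < sN := by omega
    rw [PySem.List.pyRange_one_cons (by exact_mod_cast hjs)]
    rw [List.foldl_cons]
    have hcast1 : ((j : Int) + 1) = ((j + 1 : Nat) : Int) := by push_cast; ring
    rw [hcast1]
    -- facts about the two touched positions
    have hp1 : bt + j < indices.length := by omega
    have hp2 : bt + j + sN < indices.length := by omega
    have hne12 : bt + j ≠ bt + j + sN := by omega
    have hca : ((bt : Nat) : Int) + (j : Int) = ((bt + j : Nat) : Int) := by push_cast; ring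
    have hcb : ((bt : Nat) : Int) + (j : Int) + (sN : Int) = ((bt + j + sN : Nat) : Int) := by push_cast; ring
    have ha : PySem.List.pyGetD cur ((bt + j : Nat) : Int) 0 =
        PySem.List.pyGetD indices ((bt + j : Nat) : Int) 0 := by
      rw [hinv (bt + j) hp1, if_neg (by omega)]
    have hb : PySem.List.pyGetD cur ((bt + j + sN : Nat) : Int) 0 =
        PySem.List.pyGetD indices ((bt + j + sN : Nat) : Int) 0 := by
      rw [hinv (bt + j + sN) hp2, if_neg (by omega)]
    have hee : bt + sN + j = bt + j + sN := by omega
    have hwl := csWinner_low arr indices sN bt j hs hbt hjs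
    have hwh := csWinner_high arr indices sN bt j hs hbt hjs
    rw [hee] at hwh
    set A := PySem.List.pyGetD indices ((bt + j : Nat) : Int) 0 with hA
    set B := PySem.List.pyGetD indices ((bt + j + sN : Nat) : Int) 0 with hB
    -- evaluate one step of the inner loop
    have hstep : ∀ cur', cur' = csInner arr (sN : Int) ((bt : Nat) : Int) cur (j : Int) →
        cur'.length = indices.length ∧
        (∀ p : Nat, p < indices.length →
          PySem.List.pyGetD cur' (p : Int) 0 =
            if p < bt + (j+1) ∨ (bt + sN ≤ p ∧ p < bt + sN + (j+1)) then
              csWinner arr indices (sN : Int) (p : Int)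
            else PySem.List.pyGetD indices (p : Int) 0) := by
      intro cur' hcur'
      simp only [csInner] at hcur'
      rw [hca] at hcur'
      have hcb' : ((bt + j : Nat) : Int) + (sN : Int) = ((bt + j + sN : Nat) : Int) := by
        push_cast; ring
      rw [hcb'] at hcur'
      rw [ha, hb] at hcur'
      by_cases hcmp : PySem.List.pyGetD arr A 0 > PySem.List.pyGetD arr B 0
      · rw [if_pos hcmp] at hcur'
        have hl1 : (PySem.List.pySetD cur ((bt + j : Nat) : Int) B).length = indices.length := by
          rw [PySem.List.length_pySetD, hcl]
        constructor
        · rw [hcur', PySem.List.length_pySetD, hl1]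
        · intro p hp
          rw [hcur']
          rw [PySem.List.pyGetD_pySetD_natCast _ _ _ _ _ (by rw [PySem.List.length_pySetD]; omega)]
          by_cases hp2' : p = bt + j + sN
          · subst hp2'
            rw [if_pos rfl, if_pos (by omega), hwh, if_neg (by omega)]
          · rw [if_neg hp2']
            rw [PySem.List.pyGetD_pySetD_natCast _ _ _ _ _ (by omega)]
            by_cases hp1' : p = bt + j
            · subst hp1'
              rw [if_pos rfl, if_pos (by omega), hwl, if_neg (by omega)]
            · rw [if_neg hp1', hinv p hp]
              by_cases hc : p < bt + j ∨ (bt + sN ≤ p ∧ p < bt + sN + j)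
              · rw [if_pos hc, if_pos (by omega)]
              · rw [if_neg hc, if_neg (by omega)]
      · rw [if_neg hcmp] at hcur'
        subst hcur'
        refine ⟨hcl, ?_⟩
        intro p hp
        by_cases hp1' : p = bt + j
        · subst hp1'
          rw [ha, ← hA, if_pos (by omega), hwl, if_pos (by omega)]
        · by_cases hp2' : p = bt + j + sN
          · subst hp2'
            rw [hb, ← hB, if_pos (by omega), hwh, if_pos (by omega)]
          · rw [hinv p hp]
            by_cases hc : p < bt + j ∨ (bt + sN ≤ p ∧ p < bt + sN + j)
            · rw [if_pos hc, if_pos (by omega)]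
            · rw [if_neg hc, if_neg (by omega)]
    obtain ⟨hl', hinv'⟩ := hstep _ rfl
    exact ih (j+1) _ (by omega) hl' hinv'

theorem cs_outer (arr indices : List Int) (sN : Nat) (hs : 0 < sN) :
    ∀ (c t : Nat) (cur : List Int), 2*sN*t + 2*sN*c ≤ indices.length →
      cur.length = indices.length →
      (∀ p : Nat, p < indices.length →
        PySem.List.pyGetD cur (p : Int) 0 =
          if p < 2*sN*t then csWinner arr indices (sN : Int) (p : Int)
          else PySem.List.pyGetD indices (p : Int) 0) →
      ((List.range' t c).foldl
          (fun cur u => (PySem.List.pyRange 0 (sN : Int) 1).foldl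
              (csInner arr (sN : Int) ((2*sN*u : Nat) : Int)) cur) cur).length = indices.length ∧
      (∀ p : Nat, p < indices.length →
        PySem.List.pyGetD ((List.range' t c).foldl
            (fun cur u => (PySem.List.pyRange 0 (sN : Int) 1).foldl
                (csInner arr (sN : Int) ((2*sN*u : Nat) : Int)) cur) cur) (p : Int) 0 =
          if p < 2*sN*t + 2*sN*c then csWinner arr indices (sN : Int) (p : Int)
          else PySem.List.pyGetD indices (p : Int) 0) := by
  intro c
  induction c with
  | zero =>
    intro t cur hbound hcl hinv
    simp only [List.range', List.foldl_nil]
    refine ⟨hcl, ?_⟩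
    intro p hp
    rw [hinv p hp]
    have : 2*sN*t + 2*sN*0 = 2*sN*t := by ring
    rw [this]
  | succ c ih =>
    intro t cur hbound hcl hinv
    have hexp : 2*sN*(c+1) = 2*sN*c + 2*sN := by ring
    rw [List.range'_succ, List.foldl_cons]
    have hbt : (2*sN*t) % (2*sN) = 0 := Nat.mul_mod_right _ _
    have hblock : 2*sN*t + 2*sN ≤ indices.length := by omega
    have hinv0 : ∀ p : Nat, p < indices.length →
        PySem.List.pyGetD cur (p : Int) 0 =
          if p < 2*sN*t + 0 ∨ (2*sN*t + sN ≤ p ∧ p < 2*sN*t + sN + 0) then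
            csWinner arr indices (sN : Int) (p : Int)
          else PySem.List.pyGetD indices (p : Int) 0 := by
      intro p hp
      rw [hinv p hp]
      by_cases hc : p < 2*sN*t
      · rw [if_pos hc, if_pos (by omega)]
      · rw [if_neg hc, if_neg (by omega)]
    have hblk := cs_inner_block arr indices sN (2*sN*t) hs hbt hblock sN 0 cur
      (by omega) hcl hinv0
    simp only [Nat.cast_zero] at hblk
    obtain ⟨hl', hinv'⟩ := hblk
    have hinv'' : ∀ p : Nat, p < indices.length →
        PySem.List.pyGetD ((PySem.List.pyRange 0 (sN : Int) 1).foldl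
            (csInner arr (sN : Int) ((2*sN*t : Nat) : Int)) cur) (p : Int) 0 =
          if p < 2*sN*(t+1) then csWinner arr indices (sN : Int) (p : Int)
          else PySem.List.pyGetD indices (p : Int) 0 := by
      have hexp2 : 2*sN*(t+1) = 2*sN*t + 2*sN := by ring
      intro p hp
      rw [hinv' p hp, hexp2]
    have h1 : 2*sN*(t+1) = 2*sN*t + 2*sN := by ring
    have hb2 : 2*sN*(t+1) + 2*sN*c ≤ indices.length := by omega
    have hres := ih (t+1) _ hb2 hl' hinv''
    obtain ⟨hrl, hrv⟩ := hres
    refine ⟨hrl, ?_⟩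
    intro p hp
    rw [hrv p hp]
    by_cases hc : p < 2*sN*(t+1) + 2*sN*c
    · rw [if_pos hc, if_pos (by omega)]
    · rw [if_neg hc, if_neg (by omega)]

theorem outer_range_eq (sN n m : Nat) (hs : 0 < sN) (hm : 2*sN*m = n) :
    PySem.List.pyRange 0 (n : Int) ((sN : Int) * 2) =
      (List.range' 0 m).map (fun u => ((2*sN*u : Nat) : Int)) := by
  rw [PySem.List.pyRange_of_pos 0 (n : Int) (by positivity)]
  have hfun : (fun k : Nat => (0 : Int) + (sN : Int) * 2 * (k : Int)) =
      (fun u : Nat => ((2*sN*u : Nat) : Int)) := by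
    funext k; push_cast; ring
  rw [← List.range_eq_range', ← hfun]
  congr 1
  by_cases hn : (0 : Int) < (n : Int)
  · rw [if_pos hn]
    have hn' : 0 < n := by exact_mod_cast hn
    have hm' : 0 < m := by
      rcases Nat.eq_zero_or_pos m with h | h
      · subst h; simp at hm; omega
      · exact h
    have e1 : ((n : Int) - 0 + (sN : Int) * 2 - 1) = ((n + 2*sN - 1 : Nat) : Int) := by
      have : 1 ≤ n + 2*sN := by omega
      push_cast [this]
      ring
    rw [e1]
    have e2 : ((n + 2*sN - 1 : Nat) : Int) / (((sN : Int)) * 2) = (((n + 2*sN - 1) / (2*sN) : Nat) : Int) := by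
      have h2 : ((sN : Int)) * 2 = ((2*sN : Nat) : Int) := by push_cast; ring
      rw [h2, Int.natCast_div]
    rw [e2, Int.toNat_natCast]
    have e3 : n + 2*sN - 1 = 2*sN*m + (2*sN - 1) := by omega
    rw [e3, Nat.mul_add_div (by omega), Nat.div_eq_of_lt (by omega)]
    simp
  · rw [if_neg hn]
    have hn' : n = 0 := by omega
    rw [hn'] at hm
    rcases Nat.mul_eq_zero.mp hm with h | h
    · exact absurd h (by omega)
    · rw [h]

theorem pyRange_neg_empty (b s : Int) (hb : 0 ≤ b) (hs : s < 0) :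
    PySem.List.pyRange 0 b s = [] := by
  simp only [PySem.List.pyRange]
  rw [if_neg (by omega : ¬ s = 0), if_neg (by omega : ¬ 0 < s), if_neg (by omega : ¬ b < 0)]
  simp

-- ===== VERDICT (by name: the statement is the Claim_ definition above) =====
theorem compare_and_swap_spec : Claim_equal_compare_and_swap := by
  intro arr indices stride _ hpre
  unfold Spec_compare_and_swap
  rcases hpre with hneg | ⟨hs1, hmod, _⟩
  · -- stride < 0: the outer range is empty, A returns the copy; B keeps every slot
    have hA : compare_and_swap arr indices stride = indices := by
      unfold compare_and_swap
      rw [PySem.List.len_eq,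
        pyRange_neg_empty _ _ (Int.natCast_nonneg _) (by omega)]
      rfl
    rw [hA]
    apply List.ext_getElem
    · simp [compare_and_swap_alt]
    · intro p h1 h2
      unfold compare_and_swap_alt
      rw [List.getElem_map (f := fun k : Nat => csWinner arr indices stride (k : Int))]
      rw [List.getElem_range]
      simp only [csWinner]
      rw [if_neg (by omega : ¬ (0:Int) < stride)]
      rw [PySem.List.pyGetD_ofNat _ _ _ h1]
  · -- 1 ≤ stride
    have hsn : stride = ((stride.toNat : Nat) : Int) := (Int.toNat_of_nonneg (by omega)).symm
    set sN := stride.toNat with hsN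
    have hs : 0 < sN := by omega
    rw [hsn] at hmod ⊢
    -- divisibility in Nat
    have hdvd : (2*sN) ∣ indices.length := by
      have h2 : (2 * ((sN : Nat) : Int)) = ((2*sN : Nat) : Int) := by push_cast; ring
      rw [h2] at hmod
      exact_mod_cast Int.dvd_of_emod_eq_zero hmod
    set m := indices.length / (2*sN) with hmdef
    have hm : 2*sN*m = indices.length := Nat.mul_div_cancel' hdvd
    unfold compare_and_swap
    rw [PySem.List.len_eq, outer_range_eq sN indices.length m hs hm, List.foldl_map]
    have hinit : ∀ p : Nat, p < indices.length →
        PySem.List.pyGetD indices (p : Int) 0 =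
          if p < 2*sN*0 then csWinner arr indices (sN : Int) (p : Int)
          else PySem.List.pyGetD indices (p : Int) 0 := by
      intro p hp
      rw [if_neg (by omega)]
    have hres := cs_outer arr indices sN hs m 0 indices (by omega) rfl hinit
    obtain ⟨hrl, hrv⟩ := hres
    apply List.ext_getElem
    · rw [hrl]
      simp [compare_and_swap_alt]
    · intro p h1 h2
      have hp : p < indices.length := by rw [← hrl]; exact h1
      have := hrv p hp
      rw [PySem.List.pyGetD_ofNat _ _ _ h1] at this
      rw [this, if_pos (by omega)]
      unfold compare_and_swap_alt
      rw [List.getElem_map (f := fun k : Nat => csWinner arr indices (((stride.toNat) : Nat) : Int) (k : Int))]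
      rw [List.getElem_range]
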